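-- pv_equiv track=rewrite | github.com/mw123/note-whisperer | src/KGS/KGS.py | perm_string
-- ===== SOURCE A (Python) =====
-- alphabet = "ABCDEFGHIJKLMNOPQRSTUVWXYZ+0123456789.abcdefghijklmnopqrstuvwxyz"
--
-- def perm_string(word, iters=1000000):
-- 	results = []
--
-- 	idx1 = alphabet.index(word[0])
-- 	idx2 = alphabet.index(word[1])
-- 	idx3 = alphabet.index(word[2])
-- 	idx4 = alphabet.index(word[3])
-- 	idx5 = alphabet.index(word[4])
--
-- 	while idx1 < len(alphabet):
-- 		while idx2 < len(alphabet):
-- 			while idx3 < len(alphabet):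
-- 				while idx4 < len(alphabet):
-- 					while idx5 < len(alphabet):
-- 						key = ''.join([alphabet[idx1],alphabet[idx2],alphabet[idx3],alphabet[idx4],alphabet[idx5]])
-- 						results.append((key, False))
-- 						if len(results) > iters:
-- 							return results
-- 						idx5 += 1
-- 					idx5 = 0
-- 					idx4 += 1
-- 				idx4 = 0
-- 				idx3 += 1
-- 			idx3 = 0
-- 			idx2 += 1
-- 		idx2 = 0
-- 		idx1 += 1
-- 	return results
-- ===== SOURCE B (Python) =====
-- alphabet = "ABCDEFGHIJKLMNOPQRSTUVWXYZ+0123456789.abcdefghijklmnopqrstuvwxyz"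
--
-- def perm_string(word, iters=1000000):
--     # Encode the start word as a single base-64 counter, then decode each
--     # successive value back into a 5-char key -- one flat loop instead of
--     # five nested index loops.
--     n = 0
--     for i in range(5):
--         n = n * 64 + alphabet.index(word[i])
--     results = []
--     while n < 64 ** 5:
--         m, d5 = divmod(n, 64)
--         m, d4 = divmod(m, 64)
--         m, d3 = divmod(m, 64)
--         m, d2 = divmod(m, 64)
--         m, d1 = divmod(m, 64)
--         key = alphabet[d1] + alphabet[d2] + alphabet[d3] + alphabet[d4] + alphabet[d5]
--         results.append((key, False))
--         if len(results) > iters: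
--             return results
--         n += 1
--     return results
-- ===== Notes on version B (the rewrite author's own statement) =====
-- stated objective: simpler
-- what changed: Replaces the five nested while-loops over per-position alphabet indices by a single flat loop over one base-64 counter: the start word is encoded as an integer N and each successive value is decoded back into a 5-char key by divmod.
import Mathlib
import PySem

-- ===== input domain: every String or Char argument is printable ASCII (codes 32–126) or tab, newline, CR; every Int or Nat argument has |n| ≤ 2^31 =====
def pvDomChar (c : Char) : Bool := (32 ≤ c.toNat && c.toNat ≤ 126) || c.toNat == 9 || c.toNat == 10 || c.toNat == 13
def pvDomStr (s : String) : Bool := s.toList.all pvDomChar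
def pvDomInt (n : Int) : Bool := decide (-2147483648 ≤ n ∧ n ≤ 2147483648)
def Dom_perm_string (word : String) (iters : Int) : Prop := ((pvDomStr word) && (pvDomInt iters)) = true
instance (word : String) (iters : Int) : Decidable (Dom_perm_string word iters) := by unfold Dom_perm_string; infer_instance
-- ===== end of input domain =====

set_option maxRecDepth 4000


-- B replaces A's five nested index loops by one flat base-64 counter loop (same asymptotic cost; objective: simpler);
-- equivalence is about the return value on inputs where A returns (Pre_ excludes the raising ones).

-- ===== PORT A =====
-- the module constant `alphabet` as a list of its 64 characters
def alphaL : List Char := "ABCDEFGHIJKLMNOPQRSTUVWXYZ+0123456789.abcdefghijklmnopqrstuvwxyz".toList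

-- alphabet[i]; exact at every use site (the loop guards keep i < 64)
def aGet (i : Nat) : Char := alphaL.getD i ' '

-- alphabet.index(word[i]) : none = IndexError / ValueError (excluded by Pre_)
def idxOf (word : String) (i : Int) : Option Nat :=
  (PySem.List.pyGet? word.toList i).bind (fun c => PySem.List.index? alphaL c)

-- A's innermost `while idx5 < len(alphabet)` loop; the Bool flags the early `return`.
-- `fuel` is only a structural-termination device: each level runs at most 64 steps,
-- so fuel = 64 at every call site is never exhausted before the loop guard fails.
def loopA5 : Nat → Int → Nat → Nat → Nat → Nat → Nat → List (String × Bool) →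
    List (String × Bool) × Bool
  | 0, _, _, _, _, _, _, acc => (acc, false)  -- unreachable: fuel ≥ 64 - i5 at every call
  | fuel + 1, iters, i1, i2, i3, i4, i5, acc =>
    if i5 < 64 then
      let key := String.mk [aGet i1, aGet i2, aGet i3, aGet i4, aGet i5]
      let acc' := acc ++ [(key, false)]
      if (acc'.length : Int) > iters then (acc', true)
      else loopA5 fuel iters i1 i2 i3 i4 (i5 + 1) acc'
    else (acc, false)

def loopA4 : Nat → Int → Nat → Nat → Nat → Nat → Nat → List (String × Bool) →
    List (String × Bool) × Bool
  | 0, _, _, _, _, _, _, acc => (acc, false)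
  | fuel + 1, iters, i1, i2, i3, i4, i5, acc =>
    if i4 < 64 then
      match loopA5 64 iters i1 i2 i3 i4 i5 acc with
      | (a, true) => (a, true)
      | (a, false) => loopA4 fuel iters i1 i2 i3 (i4 + 1) 0 a
    else (acc, false)

def loopA3 : Nat → Int → Nat → Nat → Nat → Nat → Nat → List (String × Bool) →
    List (String × Bool) × Bool
  | 0, _, _, _, _, _, _, acc => (acc, false)
  | fuel + 1, iters, i1, i2, i3, i4, i5, acc =>
    if i3 < 64 then
      match loopA4 64 iters i1 i2 i3 i4 i5 acc with
      | (a, true) => (a, true)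
      | (a, false) => loopA3 fuel iters i1 i2 (i3 + 1) 0 0 a
    else (acc, false)

def loopA2 : Nat → Int → Nat → Nat → Nat → Nat → Nat → List (String × Bool) →
    List (String × Bool) × Bool
  | 0, _, _, _, _, _, _, acc => (acc, false)
  | fuel + 1, iters, i1, i2, i3, i4, i5, acc =>
    if i2 < 64 then
      match loopA3 64 iters i1 i2 i3 i4 i5 acc with
      | (a, true) => (a, true)
      | (a, false) => loopA2 fuel iters i1 (i2 + 1) 0 0 0 a
    else (acc, false)

def loopA1 : Nat → Int → Nat → Nat → Nat → Nat → Nat → List (String × Bool) →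
    List (String × Bool) × Bool
  | 0, _, _, _, _, _, _, acc => (acc, false)
  | fuel + 1, iters, i1, i2, i3, i4, i5, acc =>
    if i1 < 64 then
      match loopA2 64 iters i1 i2 i3 i4 i5 acc with
      | (a, true) => (a, true)
      | (a, false) => loopA1 fuel iters (i1 + 1) 0 0 0 0 a
    else (acc, false)

def perm_string (word : String) (iters : Int) : List (String × Bool) :=
  match idxOf word 0, idxOf word 1, idxOf word 2, idxOf word 3, idxOf word 4 with
  | some i1, some i2, some i3, some i4, some i5 => (loopA1 64 iters i1 i2 i3 i4 i5 []).1
  | _, _, _, _, _ => []  -- Python raises here: outside Pre_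

-- ===== PORT B =====
-- B keeps its own copies of the module constant and helpers (no code shared with port A)
def alphaB : List Char := "ABCDEFGHIJKLMNOPQRSTUVWXYZ+0123456789.abcdefghijklmnopqrstuvwxyz".toList

def bGet (i : Nat) : Char := alphaB.getD i ' '

def idxOfB (word : String) (i : Int) : Option Nat :=
  (PySem.List.pyGet? word.toList i).bind (fun c => PySem.List.index? alphaB c)

-- decode the counter n into the 5-char key (B's divmod cascade)
def keyOfB (n : Nat) : String :=
  let d5 := n % 64
  let m1 := n / 64
  let d4 := m1 % 64
  let m2 := m1 / 64
  let d3 := m2 % 64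
  let m3 := m2 / 64
  let d2 := m3 % 64
  let m4 := m3 / 64
  let d1 := m4 % 64
  String.mk [bGet d1, bGet d2, bGet d3, bGet d4, bGet d5]

-- B's flat `while n < 64 ** 5` loop; `fuel` is only a structural-termination device
-- (fuel = 64^5 at the call site is never exhausted before n reaches 64^5)
def loopB : Nat → Int → Nat → List (String × Bool) → List (String × Bool)
  | 0, _, _, acc => acc  -- unreachable: fuel ≥ 64^5 - n at every call
  | fuel + 1, iters, n, acc =>
    if n < 64 ^ 5 then
      let acc' := acc ++ [(keyOfB n, false)]
      if (acc'.length : Int) > iters then acc'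
      else loopB fuel iters (n + 1) acc'
    else acc

-- n = ((((index(word[0])*64 + index(word[1]))*64 + index(word[2]))*64 + index(word[3]))*64 + index(word[4])
def encodeB (word : String) : Option Nat :=
  (idxOfB word 0).bind fun i1 =>
  (idxOfB word 1).bind fun i2 =>
  (idxOfB word 2).bind fun i3 =>
  (idxOfB word 3).bind fun i4 =>
  (idxOfB word 4).map fun i5 => (((i1 * 64 + i2) * 64 + i3) * 64 + i4) * 64 + i5

def perm_string_alt (word : String) (iters : Int) : List (String × Bool) :=
  match encodeB word with
  | some n => loopB (64 ^ 5) iters n []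
  | none => []  -- Python raises here: outside Pre_

-- ===== PRECONDITION & SPEC =====
-- Pre_ excludes exactly the inputs where Python A raises: words shorter than 5
-- characters (IndexError) or whose first 5 characters are not all in the alphabet (ValueError).
def alphaPre : List Char := "ABCDEFGHIJKLMNOPQRSTUVWXYZ+0123456789.abcdefghijklmnopqrstuvwxyz".toList

def Pre_perm_string (word : String) (iters : Int) : Prop :=
  5 ≤ word.toList.length ∧ ((word.toList.take 5).all (fun c => alphaPre.contains c)) = true

instance (word : String) (iters : Int) : Decidable (Pre_perm_string word iters) := by
  unfold Pre_perm_string; infer_instance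

def pvWitness_perm_string : String × Int := ("AAAAA", 3)

def Spec_perm_string (word : String) (iters : Int) (out : List (String × Bool)) : Prop := out = perm_string_alt word iters
instance (word : String) (iters : Int) (out : List (String × Bool)) : Decidable (Spec_perm_string word iters out) := by unfold Spec_perm_string; infer_instance

-- ===== CLAIM (what is proved, stated in full; the proofs are below) =====
def Claim_equal_perm_string : Prop := ∀ (word : String) (iters : Int), Dom_perm_string word iters → Pre_perm_string word iters → Spec_perm_string word iters (perm_string word iters)

-- ===== LEMMAS AND PROOFS =====

-- proof-side: the B loop bounded by an arbitrary end value, with A's early-return flag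
def seg (iters : Int) (bnd n : Nat) (acc : List (String × Bool)) : List (String × Bool) × Bool :=
  if n < bnd then
    let acc' := acc ++ [(keyOfB n, false)]
    if (acc'.length : Int) > iters then (acc', true)
    else seg iters bnd (n + 1) acc'
  else (acc, false)
  termination_by bnd - n

lemma seg_of_ge (iters : Int) (bnd n : Nat) (acc : List (String × Bool)) (h : bnd ≤ n) :
    seg iters bnd n acc = (acc, false) := by
  rw [seg]; simp [Nat.not_lt.mpr h]

lemma seg_append (iters : Int) : ∀ (fuel : Nat) (b1 b2 n : Nat) (acc : List (String × Bool)),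
    n ≤ b1 → b1 ≤ b2 → b1 - n ≤ fuel →
    seg iters b2 n acc =
      (match seg iters b1 n acc with
       | (a, true) => (a, true)
       | (a, false) => seg iters b2 b1 a) := by
  intro fuel
  induction fuel with
  | zero =>
      intro b1 b2 n acc h1 h2 hf
      have hn : n = b1 := by omega
      subst hn
      rw [seg_of_ge iters n n acc (le_refl _)]
  | succ k ih =>
      intro b1 b2 n acc h1 h2 hf
      by_cases h : n < b1
      · rw [seg, seg]
        simp only [if_pos h, if_pos (lt_of_lt_of_le h h2)]
        by_cases hc : ((acc ++ [(keyOfB n, false)]).length : Int) > iters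
        · simp only [if_pos hc]
        · simp only [if_neg hc]
          exact ih b1 b2 (n + 1) _ (by omega) h2 (by omega)
      · have hn : n = b1 := by omega
        subst hn
        rw [seg_of_ge iters n n acc (le_refl _)]

lemma loopB_eq_seg (iters : Int) : ∀ (fuel n : Nat) (acc : List (String × Bool)),
    64 ^ 5 - n ≤ fuel → loopB fuel iters n acc = (seg iters (64 ^ 5) n acc).1 := by
  intro fuel
  induction fuel with
  | zero =>
      intro n acc hf
      rw [seg_of_ge iters _ _ _ (by omega)]
      rfl
  | succ k ih =>
      intro n acc hf
      rw [seg]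
      simp only [loopB]
      by_cases h : n < 64 ^ 5
      · simp only [if_pos h]
        by_cases hc : ((acc ++ [(keyOfB n, false)]).length : Int) > iters
        · simp only [if_pos hc]
        · simp only [if_neg hc]
          exact ih (n + 1) (acc ++ [(keyOfB n, false)]) (by omega)
      · simp only [if_neg h]

lemma keyOfB_code (i1 i2 i3 i4 i5 : Nat)
    (h1 : i1 < 64) (h2 : i2 < 64) (h3 : i3 < 64) (h4 : i4 < 64) (h5 : i5 < 64) :
    keyOfB (16777216 * i1 + 262144 * i2 + 4096 * i3 + 64 * i4 + i5) =
      String.mk [aGet i1, aGet i2, aGet i3, aGet i4, aGet i5] := by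
  have e5 : (16777216 * i1 + 262144 * i2 + 4096 * i3 + 64 * i4 + i5) % 64 = i5 := by omega
  have q1 : (16777216 * i1 + 262144 * i2 + 4096 * i3 + 64 * i4 + i5) / 64 =
      262144 * i1 + 4096 * i2 + 64 * i3 + i4 := by omega
  have e4 : (262144 * i1 + 4096 * i2 + 64 * i3 + i4) % 64 = i4 := by omega
  have q2 : (262144 * i1 + 4096 * i2 + 64 * i3 + i4) / 64 = 4096 * i1 + 64 * i2 + i3 := by omega
  have e3 : (4096 * i1 + 64 * i2 + i3) % 64 = i3 := by omega
  have q3 : (4096 * i1 + 64 * i2 + i3) / 64 = 64 * i1 + i2 := by omega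
  have e2 : (64 * i1 + i2) % 64 = i2 := by omega
  have q4 : (64 * i1 + i2) / 64 = i1 := by omega
  have e1 : i1 % 64 = i1 := by omega
  simp only [keyOfB, e5, q1, e4, q2, e3, q3, e2, q4, e1]
  rfl

lemma loopA5_eq (iters : Int) : ∀ (fuel i1 i2 i3 i4 i5 : Nat) (acc : List (String × Bool)),
    i1 < 64 → i2 < 64 → i3 < 64 → i4 < 64 → i5 ≤ 64 → 64 - i5 ≤ fuel →
    ∀ b n, b = 16777216 * i1 + 262144 * i2 + 4096 * i3 + 64 * i4 + 64 →
      n = 16777216 * i1 + 262144 * i2 + 4096 * i3 + 64 * i4 + i5 →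
    loopA5 fuel iters i1 i2 i3 i4 i5 acc = seg iters b n acc := by
  intro fuel
  induction fuel with
  | zero =>
      intro i1 i2 i3 i4 i5 acc h1 h2 h3 h4 h5 hf b n hb hn
      rw [seg_of_ge iters b n acc (by omega)]
      rfl
  | succ k ih =>
      intro i1 i2 i3 i4 i5 acc h1 h2 h3 h4 h5 hf b n hb hn
      by_cases h : i5 < 64
      · rw [seg]
        simp only [loopA5]
        simp only [if_pos h, if_pos (show n < b by omega)]
        have hk : keyOfB n = String.mk [aGet i1, aGet i2, aGet i3, aGet i4, aGet i5] := by
          rw [hn]; exact keyOfB_code i1 i2 i3 i4 i5 h1 h2 h3 h4 h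
        rw [hk]
        by_cases hc : ((acc ++ [(String.mk [aGet i1, aGet i2, aGet i3, aGet i4, aGet i5], false)]).length : Int) > iters
        · simp only [if_pos hc]
        · simp only [if_neg hc]
          exact ih i1 i2 i3 i4 (i5 + 1) _ h1 h2 h3 h4 (by omega) (by omega) b (n + 1) hb (by omega)
      · rw [seg_of_ge iters b n acc (by omega)]
        simp only [loopA5, if_neg h]

lemma loopA4_eq (iters : Int) : ∀ (fuel i1 i2 i3 i4 i5 : Nat) (acc : List (String × Bool)),
    i1 < 64 → i2 < 64 → i3 < 64 → i4 ≤ 64 → i5 ≤ 64 → 64 * i4 + i5 ≤ 4096 → 64 - i4 ≤ fuel →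
    ∀ b n, b = 16777216 * i1 + 262144 * i2 + 4096 * i3 + 4096 →
      n = 16777216 * i1 + 262144 * i2 + 4096 * i3 + 64 * i4 + i5 →
    loopA4 fuel iters i1 i2 i3 i4 i5 acc = seg iters b n acc := by
  intro fuel
  induction fuel with
  | zero =>
      intro i1 i2 i3 i4 i5 acc h1 h2 h3 h4 h5 hs hf b n hb hn
      rw [seg_of_ge iters b n acc (by omega)]
      rfl
  | succ k ih =>
      intro i1 i2 i3 i4 i5 acc h1 h2 h3 h4 h5 hs hf b n hb hn
      by_cases h : i4 < 64
      · simp only [loopA4, if_pos h]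
        have h5eq := loopA5_eq iters 64 i1 i2 i3 i4 i5 acc h1 h2 h3 h (by omega) (by omega)
          (16777216 * i1 + 262144 * i2 + 4096 * i3 + 64 * i4 + 64) n rfl (by omega)
        rw [h5eq]
        rw [seg_append iters (16777216 * i1 + 262144 * i2 + 4096 * i3 + 64 * i4 + 64)
              (16777216 * i1 + 262144 * i2 + 4096 * i3 + 64 * i4 + 64) b n acc (by omega) (by omega) (by omega)]
        rcases hseg : seg iters (16777216 * i1 + 262144 * i2 + 4096 * i3 + 64 * i4 + 64) n acc with ⟨a, d⟩
        cases d
        · simp only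
          exact ih i1 i2 i3 (i4 + 1) 0 a h1 h2 h3 (by omega) (by omega) (by omega) (by omega)
            b (16777216 * i1 + 262144 * i2 + 4096 * i3 + 64 * i4 + 64) hb (by omega)
        · simp only
      · rw [seg_of_ge iters b n acc (by omega)]
        simp only [loopA4, if_neg h]

lemma loopA3_eq (iters : Int) : ∀ (fuel i1 i2 i3 i4 i5 : Nat) (acc : List (String × Bool)),
    i1 < 64 → i2 < 64 → i3 ≤ 64 → i4 ≤ 64 → i5 ≤ 64 →
    4096 * i3 + 64 * i4 + i5 ≤ 262144 → 64 * i4 + i5 ≤ 4096 → 64 - i3 ≤ fuel →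
    ∀ b n, b = 16777216 * i1 + 262144 * i2 + 262144 →
      n = 16777216 * i1 + 262144 * i2 + 4096 * i3 + 64 * i4 + i5 →
    loopA3 fuel iters i1 i2 i3 i4 i5 acc = seg iters b n acc := by
  intro fuel
  induction fuel with
  | zero =>
      intro i1 i2 i3 i4 i5 acc h1 h2 h3 h4 h5 hs hs4 hf b n hb hn
      rw [seg_of_ge iters b n acc (by omega)]
      rfl
  | succ k ih =>
      intro i1 i2 i3 i4 i5 acc h1 h2 h3 h4 h5 hs hs4 hf b n hb hn
      by_cases h : i3 < 64
      · simp only [loopA3, if_pos h]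
        have h4eq := loopA4_eq iters 64 i1 i2 i3 i4 i5 acc h1 h2 h (by omega) (by omega) hs4 (by omega)
          (16777216 * i1 + 262144 * i2 + 4096 * i3 + 4096) n rfl (by omega)
        rw [h4eq]
        rw [seg_append iters (16777216 * i1 + 262144 * i2 + 4096 * i3 + 4096)
              (16777216 * i1 + 262144 * i2 + 4096 * i3 + 4096) b n acc (by omega) (by omega) (by omega)]
        rcases hseg : seg iters (16777216 * i1 + 262144 * i2 + 4096 * i3 + 4096) n acc with ⟨a, d⟩
        cases d
        · simp only
          exact ih i1 i2 (i3 + 1) 0 0 a h1 h2 (by omega) (by omega) (by omega) (by omega) (by omega) (by omega)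
            b (16777216 * i1 + 262144 * i2 + 4096 * i3 + 4096) hb (by omega)
        · simp only
      · rw [seg_of_ge iters b n acc (by omega)]
        simp only [loopA3, if_neg h]

lemma loopA2_eq (iters : Int) : ∀ (fuel i1 i2 i3 i4 i5 : Nat) (acc : List (String × Bool)),
    i1 < 64 → i2 ≤ 64 → i3 ≤ 64 → i4 ≤ 64 → i5 ≤ 64 →
    262144 * i2 + 4096 * i3 + 64 * i4 + i5 ≤ 16777216 →
    4096 * i3 + 64 * i4 + i5 ≤ 262144 → 64 * i4 + i5 ≤ 4096 → 64 - i2 ≤ fuel →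
    ∀ b n, b = 16777216 * i1 + 16777216 →
      n = 16777216 * i1 + 262144 * i2 + 4096 * i3 + 64 * i4 + i5 →
    loopA2 fuel iters i1 i2 i3 i4 i5 acc = seg iters b n acc := by
  intro fuel
  induction fuel with
  | zero =>
      intro i1 i2 i3 i4 i5 acc h1 h2 h3 h4 h5 hs hs3 hs4 hf b n hb hn
      rw [seg_of_ge iters b n acc (by omega)]
      rfl
  | succ k ih =>
      intro i1 i2 i3 i4 i5 acc h1 h2 h3 h4 h5 hs hs3 hs4 hf b n hb hn
      by_cases h : i2 < 64
      · simp only [loopA2, if_pos h]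
        have h3eq := loopA3_eq iters 64 i1 i2 i3 i4 i5 acc h1 h (by omega) (by omega) (by omega) hs3 hs4 (by omega)
          (16777216 * i1 + 262144 * i2 + 262144) n rfl (by omega)
        rw [h3eq]
        rw [seg_append iters (16777216 * i1 + 262144 * i2 + 262144)
              (16777216 * i1 + 262144 * i2 + 262144) b n acc (by omega) (by omega) (by omega)]
        rcases hseg : seg iters (16777216 * i1 + 262144 * i2 + 262144) n acc with ⟨a, d⟩
        cases d
        · simp only
          exact ih i1 (i2 + 1) 0 0 0 a h1 (by omega) (by omega) (by omega) (by omega) (by omega) (by omega) (by omega) (by omega)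
            b (16777216 * i1 + 262144 * i2 + 262144) hb (by omega)
        · simp only
      · rw [seg_of_ge iters b n acc (by omega)]
        simp only [loopA2, if_neg h]

lemma loopA1_eq (iters : Int) : ∀ (fuel i1 i2 i3 i4 i5 : Nat) (acc : List (String × Bool)),
    i1 ≤ 64 → i2 ≤ 64 → i3 ≤ 64 → i4 ≤ 64 → i5 ≤ 64 →
    16777216 * i1 + 262144 * i2 + 4096 * i3 + 64 * i4 + i5 ≤ 1073741824 →
    262144 * i2 + 4096 * i3 + 64 * i4 + i5 ≤ 16777216 →
    4096 * i3 + 64 * i4 + i5 ≤ 262144 → 64 * i4 + i5 ≤ 4096 → 64 - i1 ≤ fuel →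
    ∀ n, n = 16777216 * i1 + 262144 * i2 + 4096 * i3 + 64 * i4 + i5 →
    loopA1 fuel iters i1 i2 i3 i4 i5 acc = seg iters 1073741824 n acc := by
  intro fuel
  induction fuel with
  | zero =>
      intro i1 i2 i3 i4 i5 acc h1 h2 h3 h4 h5 hs hs2 hs3 hs4 hf n hn
      rw [seg_of_ge iters _ n acc (by omega)]
      rfl
  | succ k ih =>
      intro i1 i2 i3 i4 i5 acc h1 h2 h3 h4 h5 hs hs2 hs3 hs4 hf n hn
      by_cases h : i1 < 64
      · simp only [loopA1, if_pos h]
        have h2eq := loopA2_eq iters 64 i1 i2 i3 i4 i5 acc h h2 (by omega) (by omega) (by omega) hs2 hs3 hs4 (by omega)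
          (16777216 * i1 + 16777216) n rfl (by omega)
        rw [h2eq]
        rw [seg_append iters (16777216 * i1 + 16777216)
              (16777216 * i1 + 16777216) 1073741824 n acc (by omega) (by omega) (by omega)]
        rcases hseg : seg iters (16777216 * i1 + 16777216) n acc with ⟨a, d⟩
        cases d
        · simp only
          exact ih (i1 + 1) 0 0 0 0 a (by omega) (by omega) (by omega) (by omega) (by omega) (by omega) (by omega) (by omega) (by omega) (by omega)
            (16777216 * i1 + 16777216) (by omega)
        · simp only
      · rw [seg_of_ge iters _ n acc (by omega)]
        simp only [loopA1, if_neg h]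

-- ===== VERDICT (by name: the statement is the Claim_ definition above) =====
theorem perm_string_spec : Claim_equal_perm_string := by
  intro word iters _ hpre
  unfold Spec_perm_string
  obtain ⟨hlen, hmemB⟩ := hpre
  have hmem : ∀ c ∈ word.toList.take 5, c ∈ alphaL := by
    intro c hc
    have := (List.all_eq_true.mp hmemB) c hc
    simpa [alphaPre, alphaL] using this
  rcases hL : word.toList with _ | ⟨c0, t0⟩
  · rw [hL] at hlen; simp at hlen
  rcases t0 with _ | ⟨c1, t1⟩
  · rw [hL] at hlen; simp at hlen
  rcases t1 with _ | ⟨c2, t2⟩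
  · rw [hL] at hlen; simp at hlen
  rcases t2 with _ | ⟨c3, t3⟩
  · rw [hL] at hlen; simp at hlen
  rcases t3 with _ | ⟨c4, rest⟩
  · rw [hL] at hlen; simp at hlen
  rw [hL] at hmem
  have hm0 : c0 ∈ alphaL := hmem c0 (by simp)
  have hm1 : c1 ∈ alphaL := hmem c1 (by simp)
  have hm2 : c2 ∈ alphaL := hmem c2 (by simp)
  have hm3 : c3 ∈ alphaL := hmem c3 (by simp)
  have hm4 : c4 ∈ alphaL := hmem c4 (by simp)
  obtain ⟨j0, hj0⟩ := Option.isSome_iff_exists.mp ((PySem.List.index?_isSome_iff alphaL c0).mpr hm0)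
  obtain ⟨j1, hj1⟩ := Option.isSome_iff_exists.mp ((PySem.List.index?_isSome_iff alphaL c1).mpr hm1)
  obtain ⟨j2, hj2⟩ := Option.isSome_iff_exists.mp ((PySem.List.index?_isSome_iff alphaL c2).mpr hm2)
  obtain ⟨j3, hj3⟩ := Option.isSome_iff_exists.mp ((PySem.List.index?_isSome_iff alphaL c3).mpr hm3)
  obtain ⟨j4, hj4⟩ := Option.isSome_iff_exists.mp ((PySem.List.index?_isSome_iff alphaL c4).mpr hm4)
  have hlenA : alphaL.length = 64 := by decide
  obtain ⟨hb0, -, -⟩ := PySem.List.getElem_of_index?_eq_some hj0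
  obtain ⟨hb1, -, -⟩ := PySem.List.getElem_of_index?_eq_some hj1
  obtain ⟨hb2, -, -⟩ := PySem.List.getElem_of_index?_eq_some hj2
  obtain ⟨hb3, -, -⟩ := PySem.List.getElem_of_index?_eq_some hj3
  obtain ⟨hb4, -, -⟩ := PySem.List.getElem_of_index?_eq_some hj4
  rw [hlenA] at hb0 hb1 hb2 hb3 hb4
  have h0 : idxOf word 0 = some j0 := by
    unfold idxOf; rw [hL, PySem.List.pyGet?_zero_cons]; exact hj0
  have h1 : idxOf word 1 = some j1 := by
    unfold idxOf; rw [hL, show ((1:Int)) = ((1:Nat):Int) from by norm_num,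
      PySem.List.pyGet?_ofNat _ 1 (by simp only [List.length_cons]; omega)]
    exact hj1
  have h2 : idxOf word 2 = some j2 := by
    unfold idxOf; rw [hL, show ((2:Int)) = ((2:Nat):Int) from by norm_num,
      PySem.List.pyGet?_ofNat _ 2 (by simp only [List.length_cons]; omega)]
    exact hj2
  have h3 : idxOf word 3 = some j3 := by
    unfold idxOf; rw [hL, show ((3:Int)) = ((3:Nat):Int) from by norm_num,
      PySem.List.pyGet?_ofNat _ 3 (by simp only [List.length_cons]; omega)]
    exact hj3
  have h4 : idxOf word 4 = some j4 := by
    unfold idxOf; rw [hL, show ((4:Int)) = ((4:Nat):Int) from by norm_num,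
      PySem.List.pyGet?_ofNat _ 4 (by simp only [List.length_cons]; omega)]
    exact hj4
  have h0b : idxOfB word 0 = some j0 := h0
  have h1b : idxOfB word 1 = some j1 := h1
  have h2b : idxOfB word 2 = some j2 := h2
  have h3b : idxOfB word 3 = some j3 := h3
  have h4b : idxOfB word 4 = some j4 := h4
  have henc : encodeB word = some ((((j0 * 64 + j1) * 64 + j2) * 64 + j3) * 64 + j4) := by
    simp [encodeB, h0b, h1b, h2b, h3b, h4b]
  rw [perm_string, perm_string_alt, h0, h1, h2, h3, h4, henc]
  simp only
  rw [loopA1_eq iters 64 j0 j1 j2 j3 j4 [] (by omega) (by omega) (by omega) (by omega) (by omega)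
        (by omega) (by omega) (by omega) (by omega) (by omega)
        ((((j0 * 64 + j1) * 64 + j2) * 64 + j3) * 64 + j4) (by ring)]
  rw [loopB_eq_seg iters (64 ^ 5) _ [] (by omega)]
  rw [show (64 : Nat) ^ 5 = 1073741824 from by norm_num]
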